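-- pv_equiv track=rewrite | github.com/sourcery-ai-experiments/jaar | src/contract/road.py | get_forefather_roads
-- ===== SOURCE A (Python) =====
-- class Road(str):
--     pass
--
-- def get_all_road_nodes(road: Road):
--     return road.split(",")
--
-- def get_ancestor_roads(road: Road) -> list[Road:None]:
--     if road is None:
--         return []
--     nodes = get_all_road_nodes(road)
--     temp_road = nodes.pop(0)
--
--     temp_roads = [temp_road]
--     if nodes != []:
--         while nodes != []:
--             temp_road = f"{temp_road},{nodes.pop(0)}"
--             temp_roads.append(temp_road)
--
--     x_roads = []
--     while temp_roads != []:
--         x_roads.append(temp_roads.pop(len(temp_roads) - 1))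
--     return x_roads
--
-- class ForeFatherException(Exception):
--     pass
--
-- def get_forefather_roads(road: Road) -> dict[Road]:
--     ancestor_roads = get_ancestor_roads(road=road)
--     popped_road = ancestor_roads.pop(0)
--     if popped_road != road:
--         raise ForeFatherException(
--             f"Incorrect road {popped_road} removed from forefather_roads"
--         )
--     return {a_road: None for a_road in ancestor_roads}
-- ===== SOURCE B (Python) =====
-- def get_forefather_roads(road):
--     # Scan for comma positions; each ancestor road is the prefix before a comma,
--     # emitted longest-first (the full road corresponds to no comma, so it is
--     # naturally excluded).
--     commas = [i for i, ch in enumerate(road) if ch == ","]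
--     return {road[:i]: None for i in reversed(commas)}
-- ===== Notes on version B (the rewrite author's own statement) =====
-- stated objective: simpler
-- what changed: Replaces A's split/cumulative-join/reverse/pop pipeline with a single scan for comma positions whose prefixes, taken back-to-front, are exactly the ancestor roads minus the full road.
import Mathlib
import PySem

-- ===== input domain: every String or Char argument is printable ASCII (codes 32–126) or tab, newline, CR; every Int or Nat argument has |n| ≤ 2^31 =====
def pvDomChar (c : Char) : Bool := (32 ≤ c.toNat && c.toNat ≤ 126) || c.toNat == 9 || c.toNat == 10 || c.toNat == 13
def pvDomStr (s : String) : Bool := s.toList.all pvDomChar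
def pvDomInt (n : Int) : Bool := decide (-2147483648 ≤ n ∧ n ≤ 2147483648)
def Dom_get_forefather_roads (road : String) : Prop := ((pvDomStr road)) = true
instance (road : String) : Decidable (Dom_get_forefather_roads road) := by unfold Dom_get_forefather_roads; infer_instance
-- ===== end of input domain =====

-- B replaces A's split → cumulative-join → reverse → pop pipeline by one scan for
-- comma positions whose prefixes, taken back-to-front, are the ancestor roads
-- minus the full road (objective: simpler).


-- ===== PORT A =====
-- helper get_all_road_nodes: road.split(",") (on code points)
def pvGetAllRoadNodes (cs : List Char) : List (List Char) :=
  PySem.Chars.splitOn cs [',']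

-- the 'while nodes != []' loop: temp_road = temp_road + "," + nodes.pop(0); temp_roads.append(temp_road)
def pvCumLoop : List (List Char) → List Char → List (List Char) → List (List Char)
  | [], _, acc => acc
  | n :: ns, t, acc => pvCumLoop ns (t ++ ',' :: n) (acc ++ [t ++ ',' :: n])

-- the 'while temp_roads != []' loop: x_roads.append(temp_roads.pop(len(temp_roads) - 1))
def pvPopLastLoop (l acc : List (List Char)) : List (List Char) :=
  if h : l = [] then acc
  else pvPopLastLoop l.dropLast (acc ++ [l.getLast h])
termination_by l.length
decreasing_by
  have hp : 0 < l.length := List.length_pos_of_ne_nil h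
  simp [List.length_dropLast]
  omega

-- get_ancestor_roads (road is a str here, so the 'road is None' branch cannot fire)
def pvGetAncestorRoads (cs : List Char) : List (List Char) :=
  match pvGetAllRoadNodes cs with
  | [] => []  -- unreachable: str.split(",") never returns an empty list (nodes.pop(0) would raise)
  | n0 :: rest => pvPopLastLoop (pvCumLoop rest n0 [n0]) []

def get_forefather_roads (road : String) : List (String × Option String) :=
  match pvGetAncestorRoads road.toList with
  | [] => []  -- ancestor_roads.pop(0) raises IndexError here; unreachable for a str argument
  | popped :: rest =>
    if popped = road.toList then
      -- {a_road: None for a_road in ancestor_roads}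
      (rest.foldl (fun d r => d.insert (String.ofList r) none) PySem.Dict.empty).items
    else []  -- ForeFatherException; unreachable: the first popped ancestor road is always the full road

-- ===== PORT B =====
def get_forefather_roads_alt (road : String) : List (String × Option String) :=
  let cs := road.toList
  -- commas = [i for i, ch in enumerate(road) if ch == ","]
  let commas := ((PySem.List.enumerate cs).filter (fun p => p.2 == ',')).map (·.1)
  -- {road[:i]: None for i in reversed(commas)}
  (commas.reverse.foldl
    (fun d i => d.insert (String.ofList (PySem.List.slice cs none (some i))) none)
    PySem.Dict.empty).items

-- ===== PRECONDITION & SPEC =====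
def Spec_get_forefather_roads (road : String) (out : List (String × Option String)) : Prop := out = get_forefather_roads_alt road
instance (road : String) (out : List (String × Option String)) : Decidable (Spec_get_forefather_roads road out) := by unfold Spec_get_forefather_roads; infer_instance

-- ===== CLAIM (what is proved, stated in full; the proofs are below) =====
def Claim_equal_get_forefather_roads : Prop := ∀ (road : String), Dom_get_forefather_roads road → Spec_get_forefather_roads road (get_forefather_roads road)

-- ===== LEMMAS AND PROOFS =====

-- A structural reference model of s.split(",") on code points.
def pvSplit : List Char → List (List Char)
  | [] => [[]]
  | c :: r =>
    if c = ',' then [] :: pvSplit r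
    else
      match pvSplit r with
      | [] => [[c]]
      | p :: ps => (c :: p) :: ps

theorem pvSplit_ne_nil (cs : List Char) : pvSplit cs ≠ [] := by
  cases cs with
  | nil => simp [pvSplit]
  | cons c r =>
    simp only [pvSplit]
    split
    · simp
    · cases h : pvSplit r <;> simp

def pvGlue (x : List Char) : List (List Char) → List (List Char)
  | [] => [x]
  | p :: ps => (x ++ p) :: ps

theorem pvGlue_nil (l : List (List Char)) (h : l ≠ []) : pvGlue [] l = l := by
  cases l with
  | nil => exact absurd rfl h
  | cons p ps => simp [pvGlue]

theorem splitOn_go_eq : ∀ (fuel : Nat) (l cur : List Char) (acc : List (List Char)),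
    l.length ≤ fuel →
    PySem.Chars.splitOn.go [','] fuel l cur acc = acc.reverse ++ pvGlue cur.reverse (pvSplit l) := by
  intro fuel
  induction fuel with
  | zero =>
    intro l cur acc h
    have hl : l = [] := List.length_eq_zero_iff.mp (Nat.le_zero.mp h)
    subst hl
    simp [PySem.Chars.splitOn.go, pvSplit, pvGlue]
  | succ f ih =>
    intro l cur acc h
    cases l with
    | nil => simp [PySem.Chars.splitOn.go, pvSplit, pvGlue]
    | cons c rest =>
      by_cases hc : c = ','
      · subst hc
        have : [','].isPrefixOf (',' :: rest) = true := by simp [List.isPrefixOf]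
        simp only [PySem.Chars.splitOn.go, this, if_pos]
        have hd : List.drop [','].length (',' :: rest) = rest := rfl
        rw [hd, ih rest [] (cur.reverse :: acc) (by simpa using Nat.le_of_succ_le_succ h)]
        cases hr : pvSplit rest with
        | nil => exact absurd hr (pvSplit_ne_nil rest)
        | cons p ps => simp [pvSplit, pvGlue, hr]
      · have : [','].isPrefixOf (c :: rest) = false := by
          simp [List.isPrefixOf, BEq.beq]
          intro hcc; exact hc hcc.symm
        simp only [PySem.Chars.splitOn.go]
        rw [if_neg (by simp [this])]
        rw [ih rest (c :: cur) acc (by simpa using Nat.le_of_succ_le_succ h)]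
        have hrec : pvSplit (c :: rest) = pvGlue [c] (pvSplit rest) := by
          simp only [pvSplit, if_neg hc]
          cases h : pvSplit rest <;> simp [pvGlue]
        rw [hrec]
        cases h : pvSplit rest with
        | nil => exact absurd h (pvSplit_ne_nil rest)
        | cons p ps => simp [pvGlue]

theorem splitOn_eq (cs : List Char) : PySem.Chars.splitOn cs [','] = pvSplit cs := by
  unfold PySem.Chars.splitOn
  rw [splitOn_go_eq (cs.length + 1) cs [] [] (Nat.le_succ _)]
  simp [pvGlue_nil _ (pvSplit_ne_nil cs)]

-- comma positions in cs
def pvCommaIdx : List Char → List Nat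
  | [] => []
  | c :: r =>
    if c = ',' then 0 :: (pvCommaIdx r).map (· + 1)
    else (pvCommaIdx r).map (· + 1)

-- the cumulative joins produced by A's first loop
def pvCums : List Char → List (List Char) → List (List Char)
  | _, [] => []
  | t, n :: ns => (t ++ ',' :: n) :: pvCums (t ++ ',' :: n) ns

theorem pvCumLoop_eq (ns : List (List Char)) : ∀ (t : List Char) (acc : List (List Char)),
    pvCumLoop ns t acc = acc ++ pvCums t ns := by
  induction ns with
  | nil => intro t acc; simp [pvCumLoop, pvCums]
  | cons n ns ih => intro t acc; simp [pvCumLoop, pvCums, ih]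

theorem pvCums_map (ps : List (List Char)) : ∀ (a t : List Char),
    pvCums (a ++ t) ps = (pvCums t ps).map (a ++ ·) := by
  induction ps with
  | nil => intro a t; simp [pvCums]
  | cons n ns ih =>
    intro a t
    simp only [pvCums, List.map_cons, List.append_assoc]
    rw [ih a (t ++ ',' :: n)]

-- all cumulative joins of the split: [n0] ++ pvCums n0 rest = prefixes at commas ++ [cs]
theorem pvT_eq (cs : List Char) :
    (match pvSplit cs with
     | [] => []
     | p :: ps => p :: pvCums p ps) = (pvCommaIdx cs).map (cs.take ·) ++ [cs] := by
  induction cs with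
  | nil => simp [pvSplit, pvCums, pvCommaIdx]
  | cons c r ih =>
    by_cases hc : c = ','
    · subst hc
      cases h : pvSplit r with
      | nil => exact absurd h (pvSplit_ne_nil r)
      | cons p ps =>
        have ih' : p :: pvCums p ps = (pvCommaIdx r).map (r.take ·) ++ [r] := by
          rw [h] at ih; exact ih
        have hs : pvSplit (',' :: r) = [] :: p :: ps := by simp [pvSplit, h]
        have hi : pvCommaIdx (',' :: r) = 0 :: (pvCommaIdx r).map (· + 1) := by
          simp [pvCommaIdx]
        rw [hs, hi]
        show ([] : List Char) :: pvCums [] (p :: ps) = _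
        have h1 : pvCums ([] : List Char) (p :: ps) = (p :: pvCums p ps).map ((',' :: ·)) := by
          show (([] : List Char) ++ ',' :: p) :: pvCums ([] ++ ',' :: p) ps = _
          have h2 : (([] : List Char) ++ ',' :: p) = [','] ++ p := by simp
          rw [h2, pvCums_map]
          simp
        rw [h1, ih']
        simp [List.map_map, Function.comp, List.take_succ_cons]
    · cases h : pvSplit r with
      | nil => exact absurd h (pvSplit_ne_nil r)
      | cons p ps =>
        have ih' : p :: pvCums p ps = (pvCommaIdx r).map (r.take ·) ++ [r] := by
          rw [h] at ih; exact ih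
        have hs : pvSplit (c :: r) = (c :: p) :: ps := by simp [pvSplit, if_neg hc, h]
        have hi : pvCommaIdx (c :: r) = (pvCommaIdx r).map (· + 1) := by
          simp [pvCommaIdx, if_neg hc]
        rw [hs, hi]
        show (c :: p) :: pvCums (c :: p) ps = _
        have h1 : pvCums (c :: p) ps = (pvCums p ps).map ((c :: ·)) := by
          have h2 : (c :: p : List Char) = [c] ++ p := rfl
          rw [h2, pvCums_map]
          simp
        have h3 : (c :: p) :: pvCums (c :: p) ps = (p :: pvCums p ps).map ((c :: ·)) := by
          rw [h1]; simp
        rw [h3, ih']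
        simp [List.map_map, Function.comp, List.take_succ_cons]

theorem pvPopLastLoop_eq_aux : ∀ (n : Nat) (l : List (List Char)), l.length ≤ n →
    ∀ acc, pvPopLastLoop l acc = acc ++ l.reverse := by
  intro n
  induction n with
  | zero =>
    intro l hl acc
    have : l = [] := List.length_eq_zero_iff.mp (Nat.le_zero.mp hl)
    subst this
    simp [pvPopLastLoop]
  | succ n ih =>
    intro l hl acc
    by_cases h : l = []
    · subst h; simp [pvPopLastLoop]
    · rw [pvPopLastLoop, dif_neg h]
      have hlen : l.dropLast.length ≤ n := by
        have := List.length_pos_of_ne_nil h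
        simp [List.length_dropLast]; omega
      rw [ih l.dropLast hlen]
      conv_rhs => rw [← List.dropLast_append_getLast h]
      simp

theorem pvPopLastLoop_eq (l : List (List Char)) (acc : List (List Char)) :
    pvPopLastLoop l acc = acc ++ l.reverse :=
  pvPopLastLoop_eq_aux l.length l (Nat.le_refl _) acc

-- B's comma scan equals pvCommaIdx (with the running enumerate offset)
theorem enum_filter_eq (cs : List Char) : ∀ (s : Int),
    (((PySem.List.enumerate cs s).filter (fun p => p.2 == ',')).map (·.1))
      = (pvCommaIdx cs).map (fun (i : Nat) => s + (i : Int)) := by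
  induction cs with
  | nil => intro s; simp [PySem.List.enumerate_nil, pvCommaIdx]
  | cons c r ih =>
    intro s
    rw [PySem.List.enumerate_cons, List.filter_cons]
    by_cases hc : c = ','
    · subst hc
      rw [if_pos (by simp)]
      have hi : pvCommaIdx (',' :: r) = 0 :: (pvCommaIdx r).map (· + 1) := by
        simp [pvCommaIdx]
      rw [hi, List.map_cons, ih (s + 1), List.map_cons, List.map_map]
      congr 1
      · simp
      · apply List.map_congr_left
        intro i _
        simp only [Function.comp_apply]
        push_cast
        ring
    · rw [if_neg (by simp [hc])]
      have hi : pvCommaIdx (c :: r) = (pvCommaIdx r).map (· + 1) := by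
        simp [pvCommaIdx, hc]
      rw [hi, ih (s + 1), List.map_map]
      apply List.map_congr_left
      intro i _
      simp only [Function.comp_apply]
      push_cast
      ring

-- ===== VERDICT (by name: the statement is the Claim_ definition above) =====
theorem get_forefather_roads_spec : Claim_equal_get_forefather_roads := by
  intro road _
  unfold Spec_get_forefather_roads get_forefather_roads get_forefather_roads_alt
  dsimp only
  have hA : pvGetAncestorRoads road.toList
      = road.toList :: ((pvCommaIdx road.toList).map (road.toList.take ·)).reverse := by
    unfold pvGetAncestorRoads pvGetAllRoadNodes
    rw [splitOn_eq]
    cases h : pvSplit road.toList with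
    | nil => exact absurd h (pvSplit_ne_nil road.toList)
    | cons n0 rest =>
      show pvPopLastLoop (pvCumLoop rest n0 [n0]) [] = _
      rw [pvCumLoop_eq, pvPopLastLoop_eq]
      have hT : n0 :: pvCums n0 rest
          = (pvCommaIdx road.toList).map (road.toList.take ·) ++ [road.toList] := by
        have ht := pvT_eq road.toList
        rw [h] at ht
        exact ht
      have : ([n0] : List (List Char)) ++ pvCums n0 rest = n0 :: pvCums n0 rest := rfl
      rw [this, hT]
      simp [List.reverse_append]
  rw [hA]
  have hB : ((PySem.List.enumerate road.toList).filter (fun p => p.2 == ',')).map (·.1)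
      = (pvCommaIdx road.toList).map (fun (i : Nat) => (i : Int)) := by
    rw [enum_filter_eq]
    apply List.map_congr_left
    intro i _
    simp
  rw [hB]
  show (if road.toList = road.toList then _ else _) = _
  rw [if_pos rfl]
  rw [← List.map_reverse, ← List.map_reverse, List.foldl_map, List.foldl_map]
  have hf : (fun (d : PySem.Dict String (Option String)) (i : Nat) =>
        d.insert (String.ofList (PySem.List.slice road.toList none (some (i : Int)))) none)
      = (fun (d : PySem.Dict String (Option String)) (i : Nat) =>
        d.insert (String.ofList (road.toList.take i)) none) := by
    funext d i
    rw [PySem.List.slice_to_natCast]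
  rw [hf]
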